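-- pv_equiv track=rewrite | github.com/ArturRSoda/UFSC | INE5413/Trabalho-2/Src/A2_1.py | monta_componentes
-- ===== SOURCE A (Python) =====
-- def monta_componentes(componentes: list[list[int]], v: int, A: list[int]) -> list[list[int]]:
--     for subconj in componentes:
--         if (v in subconj):
--             return componentes
--     a: int = A[v-1]
--
--     if (a):
--         componentes = monta_componentes(componentes, a, A)
--         for subconj in componentes:
--             if (a in subconj):
--                 subconj.append(v)
--         return componentes
--
--     else:
--         return componentes+[[v]]
-- ===== SOURCE B (Python) =====
-- def monta_componentes(componentes: list[list[int]], v: int, A: list[int]) -> list[list[int]]: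
--     # Iterative: follow the predecessor chain from v, collecting the path,
--     # then splice the reversed path in one step.  Like A, the anchor case
--     # mutates the matching sublists of componentes in place.
--     for sub in componentes:
--         if v in sub:
--             return componentes
--     path = [v]
--     cur = v
--     while True:
--         a = A[cur - 1]
--         if a == 0:
--             return componentes + [list(reversed(path))]
--         if any(a in sub for sub in componentes):
--             tail = list(reversed(path))
--             for sub in componentes:
--                 if a in sub:
--                     sub.extend(tail)
--             return componentes
--         path.append(a)
--         cur = a
-- ===== Notes on version B (the rewrite author's own statement) =====
-- stated objective: alternative
-- what changed: A's recursion up the predecessor chain (which rescans and re-maps componentes once per chain level during unwinding) is replaced by a single iterative walk that collects the path and splices it, reversed, into the anchor components or a new component in one pass.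
import Mathlib
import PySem

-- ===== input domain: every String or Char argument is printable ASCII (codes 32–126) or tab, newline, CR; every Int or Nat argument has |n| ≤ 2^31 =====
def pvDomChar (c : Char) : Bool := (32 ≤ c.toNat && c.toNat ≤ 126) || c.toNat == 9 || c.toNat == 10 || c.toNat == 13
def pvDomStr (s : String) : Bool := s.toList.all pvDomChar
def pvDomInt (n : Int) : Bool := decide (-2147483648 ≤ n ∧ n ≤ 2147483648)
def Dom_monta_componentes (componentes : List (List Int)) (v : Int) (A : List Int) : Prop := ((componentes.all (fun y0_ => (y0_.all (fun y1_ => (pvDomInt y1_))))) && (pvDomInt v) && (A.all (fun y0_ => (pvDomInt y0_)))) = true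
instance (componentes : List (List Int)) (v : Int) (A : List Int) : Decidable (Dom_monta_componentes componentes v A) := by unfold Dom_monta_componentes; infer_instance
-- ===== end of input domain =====

-- B replaces A's recursion (which rescans componentes once per chain level) by a single
-- iterative walk that collects the predecessor path and splices it reversed in one pass;
-- the equivalence proved is about the return value (both Pythons mutate the matching
-- sublists of componentes in place in the anchor case).


-- ===== PORT A =====
-- fuel-bounded transliteration of A's recursion (Python recursion has no structural
-- measure; the fuel 2*|A|+2 is never exhausted on inputs satisfying Pre_, where the
-- predecessor walk terminates); the in-place appends of the for-loop are modelled by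
-- the map over the recursive result, which is exactly the returned value.
def mcA (f : Nat) (componentes : List (List Int)) (v : Int) (A : List Int) : List (List Int) :=
  if componentes.any (fun s => s.contains v) then componentes
  else match f with
  | 0 => []
  | f+1 =>
    match PySem.List.pyGet? A (v-1) with
    | none => []   -- IndexError in Python, outside Pre_
    | some a =>
      if a ≠ 0 then
        (mcA f componentes a A).map (fun s => if s.contains a then s ++ [v] else s)
      else componentes ++ [[v]]

def monta_componentes (componentes : List (List Int)) (v : Int) (A : List Int) : List (List Int) :=
  mcA (2*A.length+2) componentes v A

-- ===== PORT B =====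
-- fuel-bounded transliteration of Source B's while-loop (same fuel; never exhausted on Pre_)
def mcBloop (f : Nat) (componentes : List (List Int)) (A : List Int) (path : List Int) (cur : Int) : List (List Int) :=
  match f with
  | 0 => []
  | f+1 =>
    match PySem.List.pyGet? A (cur-1) with
    | none => []   -- IndexError in Python, outside Pre_
    | some a =>
      if a = 0 then componentes ++ [path.reverse]
      else if componentes.any (fun s => s.contains a) then
        componentes.map (fun s => if s.contains a then s ++ path.reverse else s)
      else mcBloop f componentes A (path ++ [a]) a

def monta_componentes_alt (componentes : List (List Int)) (v : Int) (A : List Int) : List (List Int) :=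
  if componentes.any (fun s => s.contains v) then componentes
  else mcBloop (2*A.length+2) componentes A [v] v

-- ===== PRECONDITION & SPEC =====
-- one step of the predecessor walk A performs: `some (some x)` = walking at x,
-- `some none` = stopped normally (x already in a component, or its predecessor is 0),
-- `none` = IndexError
def preStep (componentes : List (List Int)) (A : List Int) (s : Option (Option Int)) : Option (Option Int) :=
  match s with
  | none => none
  | some none => some none
  | some (some x) =>
    if componentes.any (fun c => c.contains x) then some none
    else match PySem.List.pyGet? A (x-1) with
      | none => none
      | some a => if a = 0 then some none else some (some a)

-- Pre_ = exactly the inputs on which Python A returns: the predecessor walk from v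
-- stops normally (a terminating walk visits pairwise distinct in-range vertices, hence
-- stops within 2*|A|+2 steps); excluded are only the inputs on which A raises
-- IndexError (walk leaves the index range) or RecursionError (cyclic predecessors).
def Pre_monta_componentes (componentes : List (List Int)) (v : Int) (A : List Int) : Prop :=
  (preStep componentes A)^[2*A.length+2] (some (some v)) = some none

instance (componentes : List (List Int)) (v : Int) (A : List Int) : Decidable (Pre_monta_componentes componentes v A) := by unfold Pre_monta_componentes; infer_instance

def pvWitness_monta_componentes : List (List Int) × Int × List Int := ([[1]], 2, [1, 0])

def Spec_monta_componentes (componentes : List (List Int)) (v : Int) (A : List Int) (out : List (List Int)) : Prop := out = monta_componentes_alt componentes v A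
instance (componentes : List (List Int)) (v : Int) (A : List Int) (out : List (List Int)) : Decidable (Spec_monta_componentes componentes v A out) := by unfold Spec_monta_componentes; infer_instance

-- ===== CLAIM (what is proved, stated in full; the proofs are below) =====
def Claim_equal_monta_componentes : Prop := ∀ (componentes : List (List Int)) (v : Int) (A : List Int), Dom_monta_componentes componentes v A → Pre_monta_componentes componentes v A → Spec_monta_componentes componentes v A (monta_componentes componentes v A)

-- ===== LEMMAS AND PROOFS =====

lemma pv_ne_true (b : Bool) (h : b = false) : ¬ (b = true) := by simp [h]

lemma pvMapNochange {α : Type} (f : α → α) : ∀ (l : List α), (∀ a ∈ l, f a = a) → l.map f = l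
  | [], _ => rfl
  | x :: xs, h => by
      rw [List.map_cons, h x (by simp),
        pvMapNochange f xs (fun a ha => h a (by simp [ha]))]

lemma pvMapCongr {α β : Type} (f g : α → β) : ∀ (l : List α), (∀ a ∈ l, f a = g a) → l.map f = l.map g
  | [], _ => rfl
  | x :: xs, h => by
      rw [List.map_cons, List.map_cons, h x (by simp),
        pvMapCongr f g xs (fun a ha => h a (by simp [ha]))]

lemma mcA_zero (componentes : List (List Int)) (v : Int) (A : List Int) :
    mcA 0 componentes v A
      = if componentes.any (fun s => s.contains v) then componentes else [] := rfl

lemma mcA_succ (f : Nat) (componentes : List (List Int)) (v : Int) (A : List Int) :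
    mcA (f+1) componentes v A
      = if componentes.any (fun s => s.contains v) then componentes
        else match PySem.List.pyGet? A (v-1) with
          | none => []
          | some a =>
            if a ≠ 0 then
              (mcA f componentes a A).map (fun s => if s.contains a then s ++ [v] else s)
            else componentes ++ [[v]] := rfl

lemma mcA_of_mem (f : Nat) (componentes : List (List Int)) (v : Int) (A : List Int)
    (h : componentes.any (fun s => s.contains v) = true) :
    mcA f componentes v A = componentes := by
  cases f with
  | zero => rw [mcA_zero, if_pos h]
  | succ f => rw [mcA_succ, if_pos h]

lemma mcA_succ_none (f : Nat) (componentes : List (List Int)) (v : Int) (A : List Int)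
    (hb : componentes.any (fun s => s.contains v) = false)
    (hg : PySem.List.pyGet? A (v-1) = none) :
    mcA (f+1) componentes v A = [] := by
  rw [mcA_succ, if_neg (pv_ne_true _ hb), hg]

lemma mcA_succ_some (f : Nat) (componentes : List (List Int)) (v : Int) (A : List Int) (a : Int)
    (hb : componentes.any (fun s => s.contains v) = false)
    (hg : PySem.List.pyGet? A (v-1) = some a) :
    mcA (f+1) componentes v A
      = if a ≠ 0 then
          (mcA f componentes a A).map (fun s => if s.contains a then s ++ [v] else s)
        else componentes ++ [[v]] := by
  rw [mcA_succ, if_neg (pv_ne_true _ hb), hg]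

lemma mcBloop_zero (componentes : List (List Int)) (A : List Int) (path : List Int) (cur : Int) :
    mcBloop 0 componentes A path cur = [] := rfl

lemma mcBloop_succ (f : Nat) (componentes : List (List Int)) (A : List Int) (path : List Int) (cur : Int) :
    mcBloop (f+1) componentes A path cur
      = match PySem.List.pyGet? A (cur-1) with
        | none => []
        | some a =>
          if a = 0 then componentes ++ [path.reverse]
          else if componentes.any (fun s => s.contains a) then
            componentes.map (fun s => if s.contains a then s ++ path.reverse else s)
          else mcBloop f componentes A (path ++ [a]) a := rfl

lemma mcBloop_succ_none (f : Nat) (componentes : List (List Int)) (A : List Int) (path : List Int) (cur : Int)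
    (hg : PySem.List.pyGet? A (cur-1) = none) :
    mcBloop (f+1) componentes A path cur = [] := by
  rw [mcBloop_succ, hg]

lemma mcBloop_succ_some (f : Nat) (componentes : List (List Int)) (A : List Int) (path : List Int) (cur : Int) (a : Int)
    (hg : PySem.List.pyGet? A (cur-1) = some a) :
    mcBloop (f+1) componentes A path cur
      = if a = 0 then componentes ++ [path.reverse]
        else if componentes.any (fun s => s.contains a) then
          componentes.map (fun s => if s.contains a then s ++ path.reverse else s)
        else mcBloop f componentes A (path ++ [a]) a := by
  rw [mcBloop_succ, hg]

-- every output list of mcA containing x (a vertex outside componentes whose predecessor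
-- is a ≠ 0) also contains a: appended chain segments always carry the parent
lemma mcA_mem_parent (A : List Int) (componentes : List (List Int)) (x a : Int)
    (hx : PySem.List.pyGet? A (x-1) = some a) (ha : a ≠ 0)
    (hxc : ∀ s ∈ componentes, x ∉ s) :
    ∀ (f : Nat) (b : Int) (s : List Int), s ∈ mcA f componentes b A → x ∈ s → a ∈ s := by
  intro f
  induction f with
  | zero =>
    intro b s hs hxs
    by_cases hb : componentes.any (fun t => t.contains b) = true
    · rw [mcA_of_mem _ _ _ _ hb] at hs
      exact absurd hxs (hxc s hs)
    · rw [mcA_zero, if_neg hb] at hs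
      simp at hs
  | succ f ih =>
    intro b s hs hxs
    by_cases hb : componentes.any (fun t => t.contains b) = true
    · rw [mcA_of_mem _ _ _ _ hb] at hs
      exact absurd hxs (hxc s hs)
    · have hb' : componentes.any (fun t => t.contains b) = false := by
        simpa using hb
      cases hg : PySem.List.pyGet? A (b-1) with
      | none =>
        rw [mcA_succ_none f _ _ _ hb' hg] at hs
        simp at hs
      | some c =>
        rw [mcA_succ_some f _ _ _ _ hb' hg] at hs
        by_cases hc : c ≠ 0
        · rw [if_pos hc] at hs
          obtain ⟨t, ht, hts⟩ := List.mem_map.mp hs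
          by_cases hct : t.contains c = true
          · rw [if_pos hct] at hts
            subst hts
            rcases List.mem_append.mp hxs with hxt | hxb
            · exact List.mem_append_left _ (ih c t ht hxt)
            · have hxb' : x = b := by simpa using hxb
              have hac : a = c := by
                rw [hxb'] at hx
                exact Option.some.inj (hx.symm.trans hg)
              have : c ∈ t := by simpa using hct
              exact List.mem_append_left _ (hac ▸ this)
          · rw [if_neg hct] at hts
            subst hts
            exact ih c _ ht hxs
        · rw [if_neg hc] at hs
          rw [not_not] at hc
          rcases List.mem_append.mp hs with h1 | h2
          · exact absurd hxs (hxc s h1)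
          · have hsb : s = [b] := by simpa using h2
            subst hsb
            have hxb' : x = b := by simpa using hxs
            rw [hxb'] at hx
            have : a = c := Option.some.inj (hx.symm.trans hg)
            exact absurd (this.trans hc) ha

-- the loop computes mcA's result with the pending path spliced behind cur
lemma mcBloop_eq_mcA (A : List Int) (componentes : List (List Int)) :
    ∀ (f : Nat) (pre : List Int) (cur : Int),
      componentes.any (fun s => s.contains cur) = false →
      mcBloop f componentes A (pre ++ [cur]) cur
        = (mcA f componentes cur A).map
            (fun s => if s.contains cur then s ++ pre.reverse else s) := by
  intro f
  induction f with
  | zero =>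
    intro pre cur hcur
    rw [mcBloop_zero, mcA_zero, if_neg (pv_ne_true _ hcur)]
    rfl
  | succ f ih =>
    intro pre cur hcur
    have hcur' : ∀ s ∈ componentes, cur ∉ s := by
      simpa using hcur
    cases hg : PySem.List.pyGet? A (cur-1) with
    | none =>
      rw [mcBloop_succ_none f _ _ _ _ hg, mcA_succ_none f _ _ _ hcur hg]
      rfl
    | some a =>
      rw [mcBloop_succ_some f _ _ _ _ _ hg, mcA_succ_some f _ _ _ _ hcur hg]
      by_cases ha0 : a = 0
      · rw [if_pos ha0, if_neg (by simp [ha0])]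
        rw [List.map_append]
        have h1 : componentes.map (fun s => if s.contains cur then s ++ pre.reverse else s)
            = componentes := by
          apply pvMapNochange
          intro s hs
          rw [if_neg (pv_ne_true _ (by simpa using hcur' s hs))]
        rw [h1]
        have h2 : ([[cur]] : List (List Int)).map
            (fun s => if s.contains cur then s ++ pre.reverse else s)
            = [[cur] ++ pre.reverse] := by
          simp
        rw [h2]
        simp [List.reverse_append]
      · rw [if_neg ha0, if_pos ha0]
        by_cases hanc : componentes.any (fun s => s.contains a) = true
        · rw [if_pos hanc, mcA_of_mem f _ _ _ hanc, List.map_map]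
          apply pvMapCongr
          intro s hs
          simp only [Function.comp_apply]
          by_cases has : s.contains a = true
          · rw [if_pos has, if_pos has,
              if_pos (show (s ++ [cur]).contains cur = true by simp)]
            simp [List.reverse_append]
          · rw [if_neg has, if_neg has,
              if_neg (pv_ne_true _ (by simpa using hcur' s hs))]
        · rw [if_neg hanc]
          have hanc' : componentes.any (fun s => s.contains a) = false := by
            simpa using hanc
          rw [ih (pre ++ [cur]) a hanc', List.map_map]
          apply pvMapCongr
          intro s hs
          simp only [Function.comp_apply]
          by_cases has : s.contains a = true
          · rw [if_pos has, if_pos has,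
              if_pos (show (s ++ [cur]).contains cur = true by simp)]
            simp [List.reverse_append]
          · rw [if_neg has, if_neg has, if_neg ?_]
            intro hcs
            have hcs' : cur ∈ s := by simpa using hcs
            have := mcA_mem_parent A componentes cur a hg ha0 hcur' f a s hs hcs'
            exact has (by simpa using this)

-- ===== VERDICT (by name: the statement is the Claim_ definition above) =====
theorem monta_componentes_spec : Claim_equal_monta_componentes := by
  intro componentes v A _hDom _hPre
  unfold Spec_monta_componentes monta_componentes monta_componentes_alt
  by_cases hv : componentes.any (fun s => s.contains v) = true
  · rw [if_pos hv]
    exact mcA_of_mem _ _ _ _ hv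
  · rw [if_neg hv]
    have hv' : componentes.any (fun s => s.contains v) = false := by simpa using hv
    have h := mcBloop_eq_mcA A componentes (2*A.length+2) [] v hv'
    simp only [List.nil_append, List.reverse_nil, List.append_nil] at h
    rw [h]
    apply (pvMapNochange _ _ _).symm
    intro s _
    split <;> simp
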